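-- pv_equiv track=rewrite | github.com/IshaanGakhar/docTypeID | pipeline/crf_ner.py | _token_shape
-- ===== SOURCE A (Python) =====
-- def _token_shape(token: str) -> str:
--     """
--     Encode a token's character-class pattern, e.g. "Smith" → "Aa+" or "123" → "d+".
--     """
--     if not token:
--         return ""
--     shape = []
--     prev = None
--     for ch in token:
--         if ch.isupper():
--             c = "A"
--         elif ch.islower():
--             c = "a"
--         elif ch.isdigit():
--             c = "d"
--         else:
--             c = ch
--         if c != prev:
--             shape.append(c)
--             prev = c
--         else:
--             if shape and not shape[-1].endswith("+"):
--                 shape[-1] = shape[-1] + "+"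
--     return "".join(shape)
-- ===== SOURCE B (Python) =====
-- def _token_shape(token: str) -> str:
--     # Run-compress the character-class sequence with an index-based run scan
--     # (two pointers over a precomputed class list) instead of A's stateful
--     # per-character loop that mutates the last emitted piece.
--     # A run of the literal '+' class is emitted as plain '+', since '+' itself
--     # is the repetition marker.
--     classes = [
--         ("A" if ch.isupper() else "a" if ch.islower() else "d" if ch.isdigit() else ch)
--         for ch in token
--     ]
--     pieces = []
--     i, n = 0, len(classes)
--     while i < n:
--         j = i + 1
--         while j < n and classes[j] == classes[i]:
--             j += 1
--         c = classes[i]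
--         pieces.append(c if j - i == 1 or c == "+" else c + "+")
--         i = j
--     return "".join(pieces)
-- ===== Notes on version B (the rewrite author's own statement) =====
-- stated objective: alternative
-- what changed: Replaces A's stateful per-character loop (with prev tracking and in-place mutation of the last emitted piece via an endswith('+') marker) by a two-pointer run scan over a precomputed class list that emits each run's piece directly.
import Mathlib
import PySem

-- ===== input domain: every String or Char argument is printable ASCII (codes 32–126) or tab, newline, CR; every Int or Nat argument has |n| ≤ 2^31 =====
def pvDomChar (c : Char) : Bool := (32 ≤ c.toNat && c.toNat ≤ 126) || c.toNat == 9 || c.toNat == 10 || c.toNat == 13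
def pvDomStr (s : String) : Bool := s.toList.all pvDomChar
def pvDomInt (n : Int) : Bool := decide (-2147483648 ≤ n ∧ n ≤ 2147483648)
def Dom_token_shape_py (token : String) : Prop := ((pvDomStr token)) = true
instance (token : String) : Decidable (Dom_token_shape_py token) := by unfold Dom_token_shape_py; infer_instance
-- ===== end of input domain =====

-- B replaces A's stateful per-character loop (mutating the last piece via an endswith('+')
-- marker) by a two-pointer run scan over a precomputed class list; same cost, different structure.

-- ===== PORT A =====
-- A's per-character class ("A"/"a"/"d"/ch), kept as a Python string = List Char
def pvClsA (ch : Char) : List Char :=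
  if PySem.Chars.isupper ch then ['A']
  else if PySem.Chars.islower ch then ['a']
  else if PySem.Chars.isdigit ch then ['d']
  else [ch]

-- one iteration of A's for-loop; state = (shape, prev)
def pvStepA (st : List (List Char) × Option (List Char)) (ch : Char) :
    List (List Char) × Option (List Char) :=
  let c := pvClsA ch
  if st.2 ≠ some c then (st.1 ++ [c], some c)
  else if st.1 ≠ [] ∧ PySem.Chars.endswith (st.1.getLastD []) ['+'] = false then
    (st.1.dropLast ++ [st.1.getLastD [] ++ ['+']], st.2)
  else st

def token_shape_py (token : String) : String :=
  if token.toList.isEmpty then ""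
  else String.ofList (PySem.Chars.join [] (token.toList.foldl pvStepA ([], none)).1)

-- ===== PORT B =====
-- Source B's class expression (single-char Python strings = Char here)
def pvClsB (ch : Char) : Char :=
  if PySem.Chars.isupper ch then 'A'
  else if PySem.Chars.islower ch then 'a'
  else if PySem.Chars.isdigit ch then 'd'
  else ch

-- Source B's piece for a run of class c of length n
def pvPiece (c : Char) (n : Nat) : List Char :=
  if n == 1 || c == '+' then [c] else [c, '+']

-- Source B's outer while loop: the inner while advances j to the end of the maximal run
def pvRuns : List Char → List (List Char)
  | [] => []
  | c :: rest =>
      pvPiece c ((rest.takeWhile (· == c)).length + 1) :: pvRuns (rest.dropWhile (· == c))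
  termination_by l => l.length
  decreasing_by simpa using Nat.lt_succ_of_le (List.length_dropWhile_le _ _)

def token_shape_py_alt (token : String) : String :=
  String.ofList (PySem.Chars.join [] (pvRuns (token.toList.map pvClsB)))

-- ===== PRECONDITION & SPEC =====
def Spec_token_shape_py (token : String) (out : String) : Prop := out = token_shape_py_alt token
instance (token : String) (out : String) : Decidable (Spec_token_shape_py token out) := by unfold Spec_token_shape_py; infer_instance

-- ===== CLAIM (what is proved, stated in full; the proofs are below) =====
def Claim_equal_token_shape_py : Prop := ∀ (token : String), Dom_token_shape_py token → Spec_token_shape_py token (token_shape_py token)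

-- ===== LEMMAS AND PROOFS =====

-- A's step with the class character passed directly (A's c is always the singleton [d])
def pvStepD (st : List (List Char) × Option (List Char)) (d : Char) :
    List (List Char) × Option (List Char) :=
  if st.2 ≠ some [d] then (st.1 ++ [[d]], some [d])
  else if st.1 ≠ [] ∧ PySem.Chars.endswith (st.1.getLastD []) ['+'] = false then
    (st.1.dropLast ++ [st.1.getLastD [] ++ ['+']], st.2)
  else st

theorem pvClsA_eq (ch : Char) : pvClsA ch = [pvClsB ch] := by
  unfold pvClsA pvClsB; split_ifs <;> rfl

theorem pvStepA_eq (st : List (List Char) × Option (List Char)) (ch : Char) :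
    pvStepA st ch = pvStepD st (pvClsB ch) := by
  simp only [pvStepA, pvStepD, pvClsA_eq]

theorem foldA_eq (cs : List Char) (st : List (List Char) × Option (List Char)) :
    cs.foldl pvStepA st = (cs.map pvClsB).foldl pvStepD st := by
  induction cs generalizing st with
  | nil => rfl
  | cons c cs ih => simp only [List.foldl_cons, List.map_cons, pvStepA_eq, ih]

theorem ends_single (c : Char) : PySem.Chars.endswith [c] ['+'] = (c == '+') := by
  rw [PySem.Chars.endswith]
  rcases eq_or_ne c '+' with h | h
  · subst h; simp [List.isSuffixOf_iff_suffix]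
  · rw [Bool.eq_iff_iff]
    simp only [List.isSuffixOf_iff_suffix, beq_iff_eq]
    constructor
    · intro hs
      have h1 : ('+' : Char) ∈ [c] := hs.sublist.mem (by simp)
      simp at h1; exact h1.symm
    · intro hc; exact absurd hc h

theorem ends_plus (t : List Char) : PySem.Chars.endswith (t ++ ['+']) ['+'] = true := by
  rw [PySem.Chars.endswith]
  simp [List.isSuffixOf_iff_suffix]

-- once the last piece ends with '+', further repeats of the run are no-ops
theorem foldD_noop (c : Char) (run : List Char) (hrun : ∀ x ∈ run, x = c)
    (shape : List (List Char)) (t : List Char)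
    (ht : PySem.Chars.endswith t ['+'] = true) :
    run.foldl pvStepD (shape ++ [t], some [c]) = (shape ++ [t], some [c]) := by
  induction run with
  | nil => rfl
  | cons r rs ih =>
    obtain rfl : r = c := hrun r (by simp)
    have hstep : pvStepD (shape ++ [t], some [r]) r = (shape ++ [t], some [r]) := by
      simp [pvStepD, ht]
    rw [List.foldl_cons, hstep]
    exact ih (fun x hx => hrun x (by simp [hx]))

-- processing the tail of a run after its first character yields exactly Source B's piece
theorem foldD_same (c : Char) (run : List Char) (hrun : ∀ x ∈ run, x = c)
    (shape : List (List Char)) :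
    run.foldl pvStepD (shape ++ [[c]], some [c])
      = (shape ++ [pvPiece c (run.length + 1)], some [c]) := by
  cases run with
  | nil => simp [pvPiece]
  | cons r rs =>
    obtain rfl : r = c := hrun r (by simp)
    have hrs : ∀ x ∈ rs, x = r := fun x hx => hrun x (by simp [hx])
    by_cases hc : r = '+'
    · have hstep : pvStepD (shape ++ [[r]], some [r]) r = (shape ++ [[r]], some [r]) := by
        simp [pvStepD, ends_single, hc]
      rw [List.foldl_cons, hstep, foldD_noop r rs hrs shape [r] (by rw [hc]; exact ends_plus [])]
      simp [pvPiece, hc]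
    · have hstep : pvStepD (shape ++ [[r]], some [r]) r
          = (shape ++ [[r] ++ ['+']], some [r]) := by
        simp [pvStepD, ends_single, hc]
      rw [List.foldl_cons, hstep, foldD_noop r rs hrs shape ([r] ++ ['+']) (ends_plus [r])]
      simp [pvPiece, hc]

-- a whole maximal run, started fresh, appends exactly Source B's piece
theorem foldD_run (c : Char) (run rest : List Char) (hrun : ∀ x ∈ run, x = c)
    (shape : List (List Char)) (p : Option (List Char)) (hp : p ≠ some [c]) :
    (c :: (run ++ rest)).foldl pvStepD (shape, p)
      = rest.foldl pvStepD (shape ++ [pvPiece c (run.length + 1)], some [c]) := by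
  have h1 : pvStepD (shape, p) c = (shape ++ [[c]], some [c]) := by
    simp [pvStepD, hp]
  rw [List.foldl_cons, h1, List.foldl_append, foldD_same c run hrun shape]

-- the loop invariant: A's fold over the class list produces exactly Source B's run pieces
theorem foldD_main : ∀ (n : Nat) (ds : List Char), ds.length ≤ n →
    ∀ (shape : List (List Char)) (p : Option (List Char)),
    (∀ d rest, ds = d :: rest → p ≠ some [d]) →
    (ds.foldl pvStepD (shape, p)).1 = shape ++ pvRuns ds := by
  intro n
  induction n with
  | zero =>
    intro ds hds shape p _
    have : ds = [] := List.eq_nil_of_length_eq_zero (Nat.le_zero.mp hds)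
    subst this; simp [pvRuns]
  | succ n ih =>
    intro ds hds shape p hp
    cases ds with
    | nil => simp [pvRuns]
    | cons c rest =>
      have hrun : ∀ x ∈ rest.takeWhile (· == c), x = c := fun x hx => by
        have := List.mem_takeWhile_imp hx; simpa using this
      have hfresh : ∀ d rest', rest.dropWhile (· == c) = d :: rest'
          → (some [c] : Option (List Char)) ≠ some [d] := by
        intro d rest' hd
        have := List.head?_dropWhile_not (· == c) rest
        rw [hd] at this; simp at this
        simp [Ne.symm this]
      have hlen : (rest.dropWhile (· == c)).length ≤ n :=
        le_trans (List.length_dropWhile_le _ _) (by simpa using Nat.le_of_succ_le_succ hds)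
      have hsplit : c :: rest
          = c :: (rest.takeWhile (· == c) ++ rest.dropWhile (· == c)) := by
        rw [List.takeWhile_append_dropWhile]
      rw [hsplit, foldD_run c _ _ hrun shape p (hp c rest rfl),
        ih _ hlen _ (some [c]) hfresh]
      conv_rhs => rw [pvRuns]
      simp [List.append_assoc]

-- ===== VERDICT (by name: the statement is the Claim_ definition above) =====
theorem token_shape_py_spec : Claim_equal_token_shape_py := by
  intro token _
  unfold Spec_token_shape_py token_shape_py token_shape_py_alt
  by_cases h : token.toList.isEmpty
  · have h0 : token.toList = [] := List.isEmpty_iff.mp h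
    rw [if_pos h, h0]
    conv_rhs => rw [List.map_nil, pvRuns]
    rfl
  · rw [if_neg (by simpa using h), foldA_eq,
      foldD_main (token.toList.map pvClsB).length _ le_rfl [] none (by simp)]
    rfl
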